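-- pv_equiv track=rewrite | github.com/inderpal2406/python-practice-2022 | PYnative/01-loop-exercises/ex16b_sum_of_series_upto_n_terms.py | SumOfSeriesOfNTermsOfNum
-- ===== SOURCE A (Python) =====
-- def SumOfSeriesOfNTermsOfNum(fn_num,fn_num_n):
--     """Function to calculate sum of series of n terms of num"""
--     fn_sum = 0
--     for eachnumi in range(1,fn_num_n+1,1):
--         fn_num_str = str(fn_num)
--         strlist = []
--         count = 1
--         while count <= eachnumi:
--             strlist.append(fn_num_str)
--             count = count + 1
--         final_str_num = ''.join(strlist)
--         final_num = int(final_str_num)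
--         fn_sum = fn_sum + final_num
--     return fn_sum
-- ===== SOURCE B (Python) =====
-- def SumOfSeriesOfNTermsOfNum(fn_num, fn_num_n):
--     """One-pass version: grow the term string incrementally instead of
--     rebuilding each term from scratch with an inner loop."""
--     fn_num_str = str(fn_num)
--     term_str = ""
--     fn_sum = 0
--     for _ in range(fn_num_n):
--         term_str = term_str + fn_num_str
--         fn_sum = fn_sum + int(term_str)
--     return fn_sum
-- ===== Notes on version B (the rewrite author's own statement) =====
-- stated objective: simpler
-- what changed: A rebuilds each term with a nested while-loop (append i copies of str(num) to a list, join, parse); B keeps one growing term string across a single pass, appending one copy per step, so the inner loop, the list and the join disappear.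
import Mathlib
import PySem

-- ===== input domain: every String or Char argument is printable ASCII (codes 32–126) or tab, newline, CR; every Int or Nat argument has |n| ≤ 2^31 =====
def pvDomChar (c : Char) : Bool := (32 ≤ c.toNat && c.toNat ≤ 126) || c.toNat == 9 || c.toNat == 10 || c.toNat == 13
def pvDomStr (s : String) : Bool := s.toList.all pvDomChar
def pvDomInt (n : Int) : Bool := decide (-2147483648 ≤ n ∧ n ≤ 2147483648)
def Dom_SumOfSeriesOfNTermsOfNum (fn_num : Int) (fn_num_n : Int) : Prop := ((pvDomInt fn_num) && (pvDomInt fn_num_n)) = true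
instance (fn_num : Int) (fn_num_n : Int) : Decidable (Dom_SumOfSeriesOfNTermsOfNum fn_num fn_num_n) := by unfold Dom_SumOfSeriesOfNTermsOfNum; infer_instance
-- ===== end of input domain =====

-- B replaces A's nested rebuild-join-parse of every term by a single pass that grows one term string; equal sums proved on Pre_.


-- ===== PORT A =====
-- the inner 'while count <= eachnumi: strlist.append(fn_num_str); count += 1'
def pvWhileA (s : String) (i : Int) (count : Int) (acc : List String) : List String :=
  if count ≤ i then pvWhileA s i (count + 1) (acc ++ [s]) else acc
termination_by (i + 1 - count).toNat
decreasing_by omega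

def SumOfSeriesOfNTermsOfNum (fn_num : Int) (fn_num_n : Int) : Int :=
  (PySem.List.pyRange 1 (fn_num_n + 1) 1).foldl
    (fun fn_sum eachnumi =>
      let fn_num_str := PySem.Int.toStr fn_num
      let strlist := pvWhileA fn_num_str eachnumi 1 []
      let final_str_num := PySem.Str.join "" strlist
      let final_num := (PySem.Int.ofStr? final_str_num).getD 0   -- int(...); none excluded by Pre_
      fn_sum + final_num)
    0

-- ===== PORT B =====
def SumOfSeriesOfNTermsOfNum_alt (fn_num : Int) (fn_num_n : Int) : Int :=
  let fn_num_str := PySem.Int.toStr fn_num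
  ((PySem.List.pyRange 0 fn_num_n 1).foldl
    (fun (st : String × Int) _ =>
      let term_str := st.1 ++ fn_num_str
      (term_str, st.2 + (PySem.Int.ofStr? term_str).getD 0))    -- int(...); none excluded by Pre_
    ("", 0)).2

-- ===== PRECONDITION & SPEC =====
-- Pre_ excludes exactly the inputs where Python A raises: for fn_num < 0 and fn_num_n ≥ 2 the
-- term string "-5-5…" is not a valid int literal, so int() raises ValueError (in B as well).
def Pre_SumOfSeriesOfNTermsOfNum (fn_num : Int) (fn_num_n : Int) : Prop := 0 ≤ fn_num ∨ fn_num_n ≤ 1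
instance (fn_num : Int) (fn_num_n : Int) : Decidable (Pre_SumOfSeriesOfNTermsOfNum fn_num fn_num_n) := by unfold Pre_SumOfSeriesOfNTermsOfNum; infer_instance
def pvWitness_SumOfSeriesOfNTermsOfNum : Int × Int := (12, 3)

def Spec_SumOfSeriesOfNTermsOfNum (fn_num : Int) (fn_num_n : Int) (out : Int) : Prop := out = SumOfSeriesOfNTermsOfNum_alt fn_num fn_num_n
instance (fn_num : Int) (fn_num_n : Int) (out : Int) : Decidable (Spec_SumOfSeriesOfNTermsOfNum fn_num fn_num_n out) := by unfold Spec_SumOfSeriesOfNTermsOfNum; infer_instance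

-- ===== CLAIM (what is proved, stated in full; the proofs are below) =====
def Claim_equal_SumOfSeriesOfNTermsOfNum : Prop := ∀ (fn_num : Int) (fn_num_n : Int), Dom_SumOfSeriesOfNTermsOfNum fn_num fn_num_n → Pre_SumOfSeriesOfNTermsOfNum fn_num fn_num_n → Spec_SumOfSeriesOfNTermsOfNum fn_num fn_num_n (SumOfSeriesOfNTermsOfNum fn_num fn_num_n)

-- ===== LEMMAS AND PROOFS =====
theorem pvWhileA_eq (s : String) (i : Int) : ∀ (count : Int) (acc : List String),
    pvWhileA s i count acc = acc ++ List.replicate (i + 1 - count).toNat s := by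
  intro count acc
  generalize hk : (i + 1 - count).toNat = k
  induction k generalizing count acc with
  | zero => rw [pvWhileA, if_neg (by omega)]; simp
  | succ k ih =>
    rw [pvWhileA, if_pos (by omega), ih _ _ (by omega)]
    simp [List.replicate_succ]

theorem join_empty_eq_flatten (l : List String) :
    (PySem.Str.join "" l).toList = (l.map String.toList).flatten := by
  rw [PySem.Str.toList_join]
  show PySem.Chars.join [] (l.map String.toList) = _
  generalize l.map String.toList = ls
  induction ls with
  | nil => simp [PySem.Chars.join_nil]
  | cons a rest ih =>
    cases rest with
    | nil => simp [PySem.Chars.join_singleton]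
    | cons b r => rw [PySem.Chars.join_cons_cons]; simp at ih ⊢; simp [ih]

def pvTermChars (fn_num : Int) (k : Nat) : List Char :=
  (List.replicate k (PySem.Int.toStr fn_num).toList).flatten

theorem pvTermChars_succ (fn_num : Int) (k : Nat) :
    pvTermChars fn_num (k + 1) = pvTermChars fn_num k ++ (PySem.Int.toStr fn_num).toList := by
  simp [pvTermChars, List.replicate_succ']

theorem pvOfStr_congr (u v : String) (h : u.toList = v.toList) :
    PySem.Int.ofStr? u = PySem.Int.ofStr? v := by
  simp only [PySem.Int.ofStr?, h]

theorem pvB_state (fn_num : Int) (n : Nat) :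
    (((PySem.List.pyRange 0 (n : Int) 1).foldl
      (fun (st : String × Int) _ =>
        let term_str := st.1 ++ PySem.Int.toStr fn_num
        (term_str, st.2 + (PySem.Int.ofStr? term_str).getD 0)) ("", 0)).1.toList
      = pvTermChars fn_num n)
  ∧ (((PySem.List.pyRange 0 (n : Int) 1).foldl
      (fun (st : String × Int) _ =>
        let term_str := st.1 ++ PySem.Int.toStr fn_num
        (term_str, st.2 + (PySem.Int.ofStr? term_str).getD 0)) ("", 0)).2
      = (PySem.List.pyRange 1 ((n : Int) + 1) 1).foldl
        (fun fn_sum eachnumi =>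
          let fn_num_str := PySem.Int.toStr fn_num
          let strlist := pvWhileA fn_num_str eachnumi 1 []
          let final_str_num := PySem.Str.join "" strlist
          let final_num := (PySem.Int.ofStr? final_str_num).getD 0
          fn_sum + final_num) 0) := by
  induction n with
  | zero =>
    rw [PySem.List.pyRange_one_eq_nil (by omega), PySem.List.pyRange_one_eq_nil (by omega)]
    simp [pvTermChars]
  | succ n ih =>
    obtain ⟨ih1, ih2⟩ := ih
    have hc : ((n + 1 : Nat) : Int) = (n : Int) + 1 := by push_cast; ring
    rw [hc]
    rw [PySem.List.pyRange_one_succ_right (by omega),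
        PySem.List.pyRange_one_succ_right (a := 1) (by omega)]
    rw [List.foldl_append, List.foldl_append]
    constructor
    · simp only [List.foldl]
      rw [String.toList_append, ih1, ← pvTermChars_succ]
    · simp only [List.foldl]
      rw [ih2]
      congr 1
      -- remaining: the two parsed term values agree
      have hnt : ((n : Int) + 1 + 1 - 1).toNat = n + 1 := by omega
      have hA : (pvWhileA (PySem.Int.toStr fn_num) ((n : Int) + 1) 1 []) =
          List.replicate (n + 1) (PySem.Int.toStr fn_num) := by
        rw [pvWhileA_eq, hnt]; simp
      rw [hA]
      have hjoin : (PySem.Str.join "" (List.replicate (n + 1) (PySem.Int.toStr fn_num))).toList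
          = pvTermChars fn_num (n + 1) := by
        rw [join_empty_eq_flatten, List.map_replicate]; rfl
      have hB : (((PySem.List.pyRange 0 (n : Int) 1).foldl
          (fun (st : String × Int) _ =>
            let term_str := st.1 ++ PySem.Int.toStr fn_num
            (term_str, st.2 + (PySem.Int.ofStr? term_str).getD 0)) ("", 0)).1
            ++ PySem.Int.toStr fn_num).toList = pvTermChars fn_num (n + 1) := by
        rw [String.toList_append, ih1, ← pvTermChars_succ]
      rw [pvOfStr_congr _ _ (hB.trans hjoin.symm)]

-- ===== VERDICT (by name: the statement is the Claim_ definition above) =====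
theorem SumOfSeriesOfNTermsOfNum_spec : Claim_equal_SumOfSeriesOfNTermsOfNum := by
  intro fn_num fn_num_n _ _
  unfold Spec_SumOfSeriesOfNTermsOfNum SumOfSeriesOfNTermsOfNum SumOfSeriesOfNTermsOfNum_alt
  by_cases hn : fn_num_n ≤ 0
  · rw [PySem.List.pyRange_one_eq_nil (by omega), PySem.List.pyRange_one_eq_nil (by omega)]
    rfl
  · have h : fn_num_n = ((fn_num_n.toNat : Nat) : Int) := by omega
    rw [h]
    exact ((pvB_state fn_num fn_num_n.toNat).2).symm
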